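-- pv_equiv track=rewrite | github.com/mariondechallens/NLP | Exercice #3/exo3_bis_stem.py | sep_dial
-- ===== SOURCE A (Python) =====
-- def sep_dial(train):
--     indexes = []
--     for i in range(len(train)) :
--         if (train[i][0:14] == "1 your persona"):
--             indexes.append(i)
--     indexes.append(len(train))
--     ll = []
--     for i in range(len(indexes)-1):
--         ll.append(train[indexes[i]:indexes[i+1]])
--     return ll
-- ===== SOURCE B (Python) =====
-- def sep_dial(train):
--     ll = []
--     cur = None
--     for x in train:
--         if x[0:14] == "1 your persona":
--             if cur is not None:
--                 ll.append(cur)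
--             cur = [x]
--         elif cur is not None:
--             cur.append(x)
--     if cur is not None:
--         ll.append(cur)
--     return ll
-- ===== Notes on version B (the rewrite author's own statement) =====
-- stated objective: alternative
-- what changed: Replaces the two-phase index-collection-then-slicing of A with a single streaming pass that opens a new chunk at each marker and appends following lines to the current chunk.
import Mathlib
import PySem

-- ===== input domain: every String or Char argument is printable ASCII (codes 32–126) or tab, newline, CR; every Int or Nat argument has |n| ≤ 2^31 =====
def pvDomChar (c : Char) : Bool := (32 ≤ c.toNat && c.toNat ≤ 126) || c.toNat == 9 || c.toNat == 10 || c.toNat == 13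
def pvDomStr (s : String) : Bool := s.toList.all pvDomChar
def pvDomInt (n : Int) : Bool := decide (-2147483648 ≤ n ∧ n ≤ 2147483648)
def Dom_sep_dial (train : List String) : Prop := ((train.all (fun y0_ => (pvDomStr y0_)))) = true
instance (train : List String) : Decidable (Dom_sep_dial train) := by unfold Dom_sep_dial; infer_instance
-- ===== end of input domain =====

-- B replaces A's two-phase "collect marker indices, then slice between them" with a single
-- streaming pass keeping the current open chunk (different decomposition, same cost).


-- marker test shared by both Pythons, literally x[0:14] == "1 your persona"
def pvMark (x : String) : Bool := PySem.Str.slice x (some 0) (some 14) == "1 your persona"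

-- ===== PORT A =====
def sep_dial (train : List String) : List (List String) :=
  let indexes : List Nat := (List.range train.length).foldl
    (fun acc i => if pvMark (train.getD i "") then acc ++ [i] else acc) []
  let indexes := indexes ++ [train.length]
  (List.range (indexes.length - 1)).foldl
    (fun acc i => acc ++ [PySem.List.slice train (some ((indexes.getD i 0 : Nat) : Int))
                                                (some ((indexes.getD (i+1) 0 : Nat) : Int))]) []

-- ===== PORT B =====
def pvStep (st : List (List String) × Option (List String)) (x : String) :
    List (List String) × Option (List String) :=
  if pvMark x then
    match st.2 with
    | some c => (st.1 ++ [c], some [x])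
    | none => (st.1, some [x])
  else
    match st.2 with
    | some c => (st.1, some (c ++ [x]))
    | none => st

def sep_dial_alt (train : List String) : List (List String) :=
  let st := train.foldl pvStep ([], none)
  match st.2 with
  | some c => st.1 ++ [c]
  | none => st.1

-- ===== PRECONDITION & SPEC =====
def Spec_sep_dial (train : List String) (out : List (List String)) : Prop := out = sep_dial_alt train
instance (train : List String) (out : List (List String)) : Decidable (Spec_sep_dial train out) := by unfold Spec_sep_dial; infer_instance

-- ===== CLAIM (what is proved, stated in full; the proofs are below) =====
def Claim_equal_sep_dial : Prop := ∀ (train : List String), Dom_sep_dial train → Spec_sep_dial train (sep_dial train)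

-- ===== LEMMAS AND PROOFS =====

-- common reference: left-to-right chunking spec
def pvQ (x : String) : Bool := !pvMark x

def chunksL : List String → List (List String)
  | [] => []
  | x :: xs =>
    if pvMark x then (x :: xs.takeWhile pvQ) :: chunksL (xs.dropWhile pvQ)
    else chunksL xs
termination_by l => l.length
decreasing_by
  · have := List.length_dropWhile_le pvQ xs; simp; omega
  · simp

-- marker positions, head-first
def mpos : List String → List Nat
  | [] => []
  | x :: xs => (if pvMark x then [0] else []) ++ (mpos xs).map (· + 1)

-- adjacency slices
def pvSlices (train : List String) : List Nat → List (List String)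
  | [] => []
  | [_] => []
  | a :: b :: r => ((train.drop a).take (b - a)) :: pvSlices train (b :: r)

-- ===== B = chunksL =====
theorem b_open (xs : List String) : ∀ (ll : List (List String)) (c : List String),
    (match (xs.foldl pvStep (ll, some c)).2 with
     | some d => (xs.foldl pvStep (ll, some c)).1 ++ [d]
     | none => (xs.foldl pvStep (ll, some c)).1)
    = ll ++ (c ++ xs.takeWhile pvQ) :: chunksL (xs.dropWhile pvQ) := by
  induction xs with
  | nil => intro ll c; simp [chunksL]
  | cons x xs ih =>
    intro ll c
    by_cases h : pvMark x = true
    · simp only [List.foldl_cons, pvStep, if_pos, List.takeWhile_cons,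
        List.dropWhile_cons, pvQ, h, Bool.not_true]
      rw [ih (ll ++ [c]) [x]]
      simp [chunksL, h]
    · have h' : pvQ x = true := by simp [pvQ, h]
      simp only [List.foldl_cons, pvStep, h, if_neg, Bool.false_eq_true, not_false_iff,
        List.takeWhile_cons, List.dropWhile_cons, h']
      rw [ih ll (c ++ [x])]
      simp

theorem b_none (xs : List String) :
    sep_dial_alt xs = chunksL xs := by
  induction xs with
  | nil => simp [sep_dial_alt, chunksL]
  | cons x xs ih =>
    by_cases h : pvMark x = true
    · simp only [sep_dial_alt, List.foldl_cons, pvStep, h, if_pos]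
      have hc : chunksL (x :: xs) = (x :: xs.takeWhile pvQ) :: chunksL (xs.dropWhile pvQ) := by
        rw [chunksL, if_pos h]
      have := b_open xs [] [x]
      simp only [List.nil_append] at this
      rw [this, hc]
      simp
    · have hstep : sep_dial_alt (x :: xs) = sep_dial_alt xs := by
        simp [sep_dial_alt, pvStep, h]
      rw [hstep, ih]
      exact (by rw [chunksL, if_neg h] : chunksL (x :: xs) = chunksL xs).symm

-- ===== A = chunksL =====
theorem foldl_filter (p : Nat → Bool) (l : List Nat) : ∀ acc,
    l.foldl (fun acc i => if p i then acc ++ [i] else acc) acc = acc ++ l.filter p := by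
  induction l with
  | nil => simp
  | cons a l ih => intro acc; by_cases h : p a <;> simp [h, ih]

theorem mpos_eq (train : List String) :
    (List.range train.length).filter (fun i => pvMark (train.getD i "")) = mpos train := by
  induction train with
  | nil => simp [mpos]
  | cons x xs ih =>
    simp only [List.length_cons, List.range_succ_eq_map, List.filter_cons, List.filter_map]
    by_cases h : pvMark x = true <;>
      simp [h, mpos, Function.comp_def, ← ih]

theorem foldl_map (g : Nat → List String) (l : List Nat) : ∀ acc,
    l.foldl (fun acc i => acc ++ [g i]) acc = acc ++ l.map g := by
  induction l with
  | nil => simp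
  | cons a l ih => intro acc; simp [ih]

theorem adj_eq (train : List String) : ∀ (js : List Nat),
    (List.range (js.length - 1)).map (fun i =>
        PySem.List.slice train (some ((js.getD i 0 : Nat) : Int)) (some ((js.getD (i+1) 0 : Nat) : Int)))
      = pvSlices train js := by
  intro js
  induction js with
  | nil => simp [pvSlices]
  | cons a js ih =>
    cases js with
    | nil => simp [pvSlices]
    | cons b r =>
      simp only [List.length_cons, Nat.add_sub_cancel] at *
      rw [List.range_succ_eq_map]
      simp only [List.map_cons, List.map_map]
      rw [pvSlices]
      refine congrArg₂ List.cons ?_ ?_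
      · simp [PySem.List.slice_natCast]
      · rw [← ih]
        refine List.map_congr_left fun i _ => ?_
        simp [Function.comp]

theorem pvSlices_shift (train : List String) (x : String) : ∀ (js : List Nat),
    pvSlices (x :: train) (js.map (· + 1)) = pvSlices train js := by
  intro js
  induction js with
  | nil => simp [pvSlices]
  | cons a js ih =>
    cases js with
    | nil => simp [pvSlices]
    | cons b r =>
      simp only [List.map_cons] at *
      rw [pvSlices, pvSlices]
      refine congrArg₂ List.cons ?_ ?_
      · simp [Nat.succ_sub_succ]
      · exact ih

theorem takeWhile_head (xs : List String) :
    xs.takeWhile pvQ = xs.take ((mpos xs ++ [xs.length]).headD 0) := by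
  induction xs with
  | nil => simp
  | cons x xs ih =>
    by_cases h : pvMark x = true
    · simp [mpos, h, pvQ]
    · have h' : pvQ x = true := by simp [pvQ, h]
      simp only [mpos, h, if_neg, Bool.false_eq_true, not_false_iff, List.takeWhile_cons, h',
        if_pos, List.nil_append]
      rw [ih]
      rcases hm : mpos xs with _ | ⟨j, r⟩ <;> simp [List.take_succ_cons]

theorem chunksL_dropWhile (xs : List String) :
    chunksL (xs.dropWhile pvQ) = chunksL xs := by
  induction xs with
  | nil => simp
  | cons x xs ih =>
    by_cases h : pvMark x = true
    · have : pvQ x = false := by simp [pvQ, h]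
      simp [this]
    · have h' : pvQ x = true := by simp [pvQ, h]
      rw [List.dropWhile_cons, if_pos h', ih, show chunksL (x :: xs) = chunksL xs from by
        simp [chunksL, h]]

theorem a_chunks (train : List String) :
    pvSlices train (mpos train ++ [train.length]) = chunksL train := by
  induction train with
  | nil => simp [mpos, pvSlices, chunksL]
  | cons x xs ih =>
    by_cases h : pvMark x = true
    · have hL : mpos (x :: xs) ++ [(x :: xs).length] = 0 :: (mpos xs ++ [xs.length]).map (· + 1) := by
        simp [mpos, h]
      rw [hL]
      rcases hm : mpos xs ++ [xs.length] with _ | ⟨l0, L'⟩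
      · exact absurd hm (by simp)
      · simp only [List.map_cons]
        rw [pvSlices]
        rw [show chunksL (x :: xs) = (x :: xs.takeWhile pvQ) :: chunksL (xs.dropWhile pvQ) from by
          simp [chunksL, h]]
        refine congrArg₂ List.cons ?_ ?_
        · simp only [List.drop_zero, Nat.sub_zero, List.take_succ_cons]
          rw [takeWhile_head, hm]
          simp
        · have hmc : (l0 + 1) :: List.map (fun x => x + 1) L' = (l0 :: L').map (fun x => x + 1) := by
            simp
          rw [hmc, pvSlices_shift, ← hm, ih, chunksL_dropWhile]
    · have hL : mpos (x :: xs) ++ [(x :: xs).length] = (mpos xs ++ [xs.length]).map (· + 1) := by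
        simp [mpos, h]
      rw [hL, pvSlices_shift, ih, ← chunksL_dropWhile (x :: xs), List.dropWhile_cons,
        if_pos (by simp [pvQ, h]), chunksL_dropWhile]

theorem a_eq (train : List String) : sep_dial train = chunksL train := by
  rw [sep_dial]
  simp only [foldl_filter, List.nil_append, foldl_map, mpos_eq, adj_eq]
  exact a_chunks train

-- ===== VERDICT (by name: the statement is the Claim_ definition above) =====
theorem sep_dial_spec : Claim_equal_sep_dial := by
  intro train _
  unfold Spec_sep_dial
  rw [a_eq, b_none]
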